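-- pv_equiv track=rewrite | github.com/morco23/Advent-of-Code-2023 | day_12.py | convert_to_format2
-- ===== SOURCE A (Python) =====
-- def convert_to_format2(format1: list):
--     format2 = []
--     group_size = 0
--     for symbol in format1:
--         if symbol == '.' or symbol == '?':
--             if group_size > 0:
--                 format2.append(group_size)
--                 group_size = 0
--         else:
--             group_size += 1
--     if group_size > 0:
--         format2.append(group_size)
--
--     return format2
-- ===== SOURCE B (Python) =====
-- def convert_to_format2(format1: list):
--     # Separator positions (with sentinels); each gap between consecutive
--     # separators of width > 1 is a run of b - a - 1 filled symbols.
--     seps = [-1] + [i for i, s in enumerate(format1) if s == '.' or s == '?'] + [len(format1)]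
--     return [b - a - 1 for a, b in zip(seps, seps[1:]) if b - a > 1]
-- ===== Notes on version B (the rewrite author's own statement) =====
-- stated objective: alternative
-- what changed: Instead of counting run lengths with an accumulator, B first collects separator INDICES (with -1/len sentinels) and then derives each group length arithmetically as the gap between consecutive separator positions.
import Mathlib
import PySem

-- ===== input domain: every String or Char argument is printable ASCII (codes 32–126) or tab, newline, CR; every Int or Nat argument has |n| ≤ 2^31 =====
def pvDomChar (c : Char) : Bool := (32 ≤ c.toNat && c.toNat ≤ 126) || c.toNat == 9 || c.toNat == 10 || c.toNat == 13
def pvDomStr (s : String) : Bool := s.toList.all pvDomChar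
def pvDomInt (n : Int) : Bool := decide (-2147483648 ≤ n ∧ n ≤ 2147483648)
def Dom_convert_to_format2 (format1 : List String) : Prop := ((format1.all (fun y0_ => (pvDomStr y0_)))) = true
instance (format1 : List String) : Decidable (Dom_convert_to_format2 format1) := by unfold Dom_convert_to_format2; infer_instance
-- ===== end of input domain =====

-- B derives group lengths arithmetically from separator INDICES (sentinels -1 and len)
-- instead of A's running counter; equivalence of A's loop to the index-gap view is proved below.

-- ===== PORT A =====
-- the loop of A: state = (format2, group_size)
def pvALoop : List String → List Int → Int → List Int
  | [], format2, group_size => if group_size > 0 then format2 ++ [group_size] else format2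
  | symbol :: rest, format2, group_size =>
    if symbol = "." ∨ symbol = "?" then
      if group_size > 0 then pvALoop rest (format2 ++ [group_size]) 0
      else pvALoop rest format2 0
    else pvALoop rest format2 (group_size + 1)

def convert_to_format2 (format1 : List String) : List Int :=
  pvALoop format1 [] 0

-- ===== PORT B =====
-- seps = [-1] + [i for i, s in enumerate(format1) if s == '.' or s == '?'] + [len(format1)]
def pvSeps (format1 : List String) : List Int :=
  -1 :: ((PySem.List.enumerate format1).filterMap
          (fun p => if p.2 = "." ∨ p.2 = "?" then some p.1 else none))
     ++ [(format1.length : Int)]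

-- [b - a - 1 for a, b in zip(seps, seps[1:]) if b - a > 1]
def convert_to_format2_alt (format1 : List String) : List Int :=
  ((pvSeps format1).zip (pvSeps format1).tail).filterMap
    (fun p => if p.2 - p.1 > 1 then some (p.2 - p.1 - 1) else none)

-- ===== PRECONDITION & SPEC =====
def Spec_convert_to_format2 (format1 : List String) (out : List Int) : Prop := out = convert_to_format2_alt format1
instance (format1 : List String) (out : List Int) : Decidable (Spec_convert_to_format2 format1 out) := by unfold Spec_convert_to_format2; infer_instance

-- ===== CLAIM =====
def Claim_equal_convert_to_format2 : Prop := ∀ (format1 : List String), Dom_convert_to_format2 format1 → Spec_convert_to_format2 format1 (convert_to_format2 format1)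

-- ===== LEMMAS AND PROOFS =====

-- adjacent-gap view of zip(seps, seps[1:]) + filter
def pvGaps : List Int → List Int
  | a :: b :: t => (if b - a > 1 then [b - a - 1] else []) ++ pvGaps (b :: t)
  | _ => []

lemma zip_tail_eq_gaps (L : List Int) :
    (L.zip L.tail).filterMap (fun p => if p.2 - p.1 > 1 then some (p.2 - p.1 - 1) else none)
      = pvGaps L := by
  match L with
  | [] => simp [pvGaps]
  | [a] => simp [pvGaps]
  | a :: b :: t =>
    simp only [List.tail_cons, List.zip_cons_cons, List.filterMap_cons, pvGaps]
    rw [← zip_tail_eq_gaps (b :: t)]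
    by_cases h : b - a > 1 <;> simp [h]

-- separator indices of xs starting at offset i, with the trailing sentinel
def pvP (i : Int) : List String → List Int
  | [] => [i]
  | x :: xs => if x = "." ∨ x = "?" then i :: pvP (i + 1) xs else pvP (i + 1) xs

lemma seps_eq_pvP (xs : List String) : ∀ (i : Int),
    ((PySem.List.enumerate xs i).filterMap
        (fun p => if p.2 = "." ∨ p.2 = "?" then some p.1 else none))
      ++ [i + (xs.length : Int)] = pvP i xs := by
  induction xs with
  | nil => intro i; simp [pvP, PySem.List.enumerate_nil]
  | cons x xs ih =>
    intro i
    rw [PySem.List.enumerate_cons]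
    simp only [List.filterMap_cons, pvP]
    by_cases h : x = "." ∨ x = "?" <;>
      simp only [h, if_true, if_false, List.cons_append] <;>
      rw [show i + ((x :: xs).length : Int) = (i + 1) + (xs.length : Int) by
        simp; ring] <;> rw [ih (i + 1)]

lemma pvALoop_prefix (xs : List String) : ∀ (f2 : List Int) (g : Int),
    pvALoop xs f2 g = f2 ++ pvALoop xs [] g := by
  induction xs with
  | nil => intro f2 g; by_cases h : g > 0 <;> simp [pvALoop, h]
  | cons x xs ih =>
    intro f2 g
    by_cases hx : x = "." ∨ x = "?"
    · by_cases hg : g > 0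
      · simp only [pvALoop, hx, if_true, hg, List.nil_append]
        rw [ih (f2 ++ [g]) 0, ih [g] 0]
        simp
      · simp only [pvALoop, hx, if_true, hg, if_false]
        exact ih f2 0
    · simp only [pvALoop, hx, if_false]
      exact ih f2 (g + 1)

lemma gaps_eq_aloop (xs : List String) : ∀ (a i : Int), a < i →
    pvGaps (a :: pvP i xs) = pvALoop xs [] (i - a - 1) := by
  induction xs with
  | nil =>
    intro a i hai
    simp only [pvP, pvGaps, pvALoop]
    by_cases h : i - a > 1
    · rw [if_pos h, if_pos (by omega)]; simp
    · rw [if_neg h, if_neg (by omega)]; simp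
  | cons x xs ih =>
    intro a i hai
    by_cases hx : x = "." ∨ x = "?"
    · simp only [pvP, hx, if_true, pvGaps, pvALoop, List.nil_append]
      rw [ih i (i + 1) (by omega)]
      rw [show i + 1 - i - 1 = 0 by ring]
      by_cases hg : i - a - 1 > 0
      · rw [if_pos (by omega : i - a > 1), if_pos hg, pvALoop_prefix xs [i - a - 1] 0]
      · rw [if_neg (by omega : ¬ i - a > 1), if_neg hg]; simp
    · simp only [pvP, hx, if_false, pvALoop]
      rw [ih a (i + 1) (by omega)]
      congr 1
      ring

-- ===== VERDICT =====
theorem convert_to_format2_spec : Claim_equal_convert_to_format2 := by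
  intro format1 _
  unfold Spec_convert_to_format2 convert_to_format2 convert_to_format2_alt
  rw [zip_tail_eq_gaps, pvSeps, show
      (-1 : Int) :: ((PySem.List.enumerate format1).filterMap
        (fun p => if p.2 = "." ∨ p.2 = "?" then some p.1 else none)) ++ [(format1.length : Int)]
      = -1 :: pvP 0 format1 by
        rw [List.cons_append, ← seps_eq_pvP format1 0]; simp]
  rw [gaps_eq_aloop format1 (-1) 0 (by omega)]
  norm_num
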